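-- pv_equiv track=rewrite | github.com/h0az/uibk-python | exercise-4/porter.py | step_3
-- ===== SOURCE A (Python) =====
-- def is_consonant(word, index):
-- 	if word[index] in ['a', 'e', 'i', 'o', 'u']:
-- 		return False
-- 	if word[index] == 'y':
-- 		if index == 0:
-- 			return True
-- 		else:
-- 			return not is_consonant(word, index - 1)
-- 	return True
--
-- def measure(word):
-- 	cvs = ""
-- 	for i in range(len(word)):
-- 		if is_consonant(word, i):
-- 			cvs = cvs + "c"
-- 		else:
-- 			cvs = cvs + "v"
--
-- 	return cvs.count("vc")
--
-- def replace(word, suffix, replacement):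
--   return word[:-len(suffix)] + replacement
--
-- def ends(word, suffix):
--   return word[-len(suffix):] == suffix
--
-- def step_3(word):
--   for suffix_pair in [ [ "icate", "ic" ],
--                        [ "ative", "" ],
-- 					             [ "alize", "al" ],
-- 					             [ "iciti", "ic" ],
-- 					             [ "ical", "ic" ],
-- 					             [ "ful", "" ],
--                        [ "ness", "" ] ]:
--     suffix = suffix_pair[0]
--     replacement = suffix_pair[1]
--     if ends(word, suffix):
--       if measure(word[:-len(suffix)]) > 0:
--         return replace(word, suffix, replacement)
--   return word
-- ===== SOURCE B (Python) =====
-- def step_3(word):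
--     for suffix, repl in (("icate", "ic"), ("ative", ""), ("alize", "al"),
--                          ("iciti", "ic"), ("ical", "ic"), ("ful", ""), ("ness", "")):
--         if word.endswith(suffix):
--             stem = word[:-len(suffix)]
--             # one forward pass: classify each char, carrying the previous class
--             flags = []
--             prev = False
--             for ch in stem:
--                 cons = ch not in "aeiou" and not (ch == "y" and prev)
--                 flags.append(cons)
--                 prev = cons
--             # measure(stem) > 0  iff  some vowel is immediately followed by a consonant
--             if any(b and not a for a, b in zip(flags, flags[1:])):
--                 return stem + repl
--     return word
-- ===== Notes on version B (the rewrite author's own statement) =====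
-- stated objective: simpler
-- what changed: Replaces the backward is_consonant recursion and the build-a-classification-string-then-count-substring measure with a single forward pass that carries the previous character's consonant flag and checks for any vowel-to-consonant transition, so no classification string and no count are ever built.
import Mathlib
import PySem

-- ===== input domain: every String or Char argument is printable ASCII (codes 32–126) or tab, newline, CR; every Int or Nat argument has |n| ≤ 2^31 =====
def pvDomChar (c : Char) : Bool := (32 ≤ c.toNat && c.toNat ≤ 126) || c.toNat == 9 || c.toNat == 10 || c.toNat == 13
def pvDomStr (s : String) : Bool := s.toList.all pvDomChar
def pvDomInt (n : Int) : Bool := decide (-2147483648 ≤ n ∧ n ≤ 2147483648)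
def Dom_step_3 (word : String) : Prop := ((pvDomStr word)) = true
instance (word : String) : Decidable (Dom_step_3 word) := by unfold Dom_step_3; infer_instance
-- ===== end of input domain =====

-- B replaces the backward is_consonant recursion and the classification-string substring count with one forward pass
-- (running previous-class flag + any vowel→consonant transition); objective: simpler.


-- ===== PORT A =====
-- is_consonant(word, index); word[index] is always in range at every call site
-- (indices come from range(len(word)) and decrease), so pyGetD's default is never read.
def isConsA (w : List Char) : Nat → Bool
  | 0 =>
    let c := PySem.List.pyGetD w ((0 : Nat) : Int) ' '
    if c ∈ ['a', 'e', 'i', 'o', 'u'] then false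
    else if c = 'y' then true
    else true
  | i + 1 =>
    let c := PySem.List.pyGetD w ((i + 1 : Nat) : Int) ' '
    if c ∈ ['a', 'e', 'i', 'o', 'u'] then false
    else if c = 'y' then !(isConsA w i)
    else true

-- measure(word): build the 'c'/'v' string, then count "vc"
def measureA (w : List Char) : Nat :=
  let cvs := (List.range w.length).foldl
      (fun acc i => acc ++ [if isConsA w i then 'c' else 'v']) ([] : List Char)
  PySem.Chars.count cvs ['v', 'c']

-- ends(word, suffix) = (word[-len(suffix):] == suffix)
def endsA (w suf : List Char) : Bool :=
  PySem.List.slice w (some (-(suf.length : Int))) none == suf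

-- replace(word, suffix, replacement) = word[:-len(suffix)] + replacement
def replaceA (w suf rep : List Char) : List Char :=
  PySem.List.slice w none (some (-(suf.length : Int))) ++ rep

def stepA_go (w : List Char) : List (List Char × List Char) → List Char
  | [] => w
  | (suf, rep) :: rest =>
    if endsA w suf then
      if 0 < measureA (PySem.List.slice w none (some (-(suf.length : Int)))) then
        replaceA w suf rep
      else stepA_go w rest
    else stepA_go w rest

def step_3 (word : String) : String :=
  String.ofList (stepA_go word.toList
    [("icate".toList, "ic".toList), ("ative".toList, "".toList),
     ("alize".toList, "al".toList), ("iciti".toList, "ic".toList),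
     ("ical".toList, "ic".toList), ("ful".toList, "".toList),
     ("ness".toList, "".toList)])

-- ===== PORT B =====
-- one loop step: cons = ch not in "aeiou" and not (ch == "y" and prev)
def stepB (st : List Bool × Bool) (ch : Char) : List Bool × Bool :=
  let cons := !decide (ch ∈ ['a', 'e', 'i', 'o', 'u']) && !(decide (ch = 'y') && st.2)
  (st.1 ++ [cons], cons)

def flagsB (stem : List Char) : List Bool :=
  (stem.foldl stepB ([], false)).1

-- any(b and not a for a, b in zip(flags, flags[1:]))
def anyVC (flags : List Bool) : Bool :=
  (flags.zip (PySem.List.slice flags (some 1) none)).any (fun p => p.2 && !p.1)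

def stepB_go (w : List Char) : List (List Char × List Char) → List Char
  | [] => w
  | (suf, rep) :: rest =>
    if PySem.Chars.endswith w suf then
      let stem := PySem.List.slice w none (some (-(suf.length : Int)))
      if anyVC (flagsB stem) then stem ++ rep else stepB_go w rest
    else stepB_go w rest

def step_3_alt (word : String) : String :=
  String.ofList (stepB_go word.toList
    [("icate".toList, "ic".toList), ("ative".toList, "".toList),
     ("alize".toList, "al".toList), ("iciti".toList, "ic".toList),
     ("ical".toList, "ic".toList), ("ful".toList, "".toList),
     ("ness".toList, "".toList)])

-- ===== PRECONDITION & SPEC =====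
def Spec_step_3 (word : String) (out : String) : Prop := out = step_3_alt word
instance (word : String) (out : String) : Decidable (Spec_step_3 word out) := by
  unfold Spec_step_3; infer_instance

-- ===== CLAIM (what is proved, stated in full; the proofs are below) =====
def Claim_equal_step_3 : Prop := ∀ (word : String), Dom_step_3 word → Spec_step_3 word (step_3 word)

-- ===== LEMMAS AND PROOFS =====

-- number of vowel→consonant transitions in a flag list (true = consonant)
def cntVC : List Bool → Nat
  | a :: b :: t => (if b && !a then 1 else 0) + cntVC (b :: t)
  | _ => 0

lemma cntVC_cons_true (t : List Bool) : cntVC (true :: t) = cntVC t := by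
  cases t <;> simp [cntVC]

def conv (b : Bool) : Char := if b then 'c' else 'v'

-- greedy "vc"-count over a c/v string = number of adjacent (vowel, consonant) pairs
lemma go_count_eq (fuel : Nat) : ∀ (fl : List Bool) (acc : Nat),
    (fl.map conv).length ≤ fuel →
    PySem.Chars.count.go ['v', 'c'] fuel (fl.map conv) acc = acc + cntVC fl := by
  induction fuel with
  | zero =>
    intro fl acc h
    have : fl = [] := by
      cases fl with
      | nil => rfl
      | cons a t => simp at h
    subst this; simp [PySem.Chars.count.go, cntVC]
  | succ fuel ih =>
    intro fl acc h
    match fl with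
    | [] => simp [PySem.Chars.count.go, cntVC]
    | [a] =>
      have : ¬ (List.isPrefixOf ['v', 'c'] [conv a] = true) := by
        cases a <;> simp [conv, List.isPrefixOf]
      simp only [List.map, PySem.Chars.count.go, this]
      have := ih [] acc (by simp)
      simpa [cntVC] using this
    | a :: b :: t =>
      by_cases hm : a = false ∧ b = true
      · obtain ⟨ha, hb⟩ := hm; subst ha; subst hb
        have hpre : List.isPrefixOf ['v', 'c'] (conv false :: conv true :: t.map conv) = true := by
          simp [conv, List.isPrefixOf]
        have hlen : (t.map conv).length ≤ fuel := by simp at h ⊢; omega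
        calc PySem.Chars.count.go ['v','c'] (fuel+1) ((false :: true :: t).map conv) acc
            = PySem.Chars.count.go ['v','c'] fuel (t.map conv) (acc + 1) := by
              simp only [List.map, PySem.Chars.count.go, hpre, if_pos]
              rfl
          _ = acc + 1 + cntVC t := ih t (acc + 1) hlen
          _ = acc + cntVC (false :: true :: t) := by
              simp [cntVC, cntVC_cons_true]; omega
      · have hpre : ¬ (List.isPrefixOf ['v', 'c'] (conv a :: conv b :: t.map conv) = true) := by
          cases a <;> cases b <;> simp_all [conv, List.isPrefixOf]
        have hlen : ((b :: t).map conv).length ≤ fuel := by simp at h ⊢; omega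
        have step : PySem.Chars.count.go ['v','c'] (fuel+1) ((a :: b :: t).map conv) acc
            = PySem.Chars.count.go ['v','c'] fuel ((b :: t).map conv) acc := by
          simp only [List.map, PySem.Chars.count.go, hpre]
          rfl
        rw [step, ih (b :: t) acc hlen]
        have h0 : (if b && !a then 1 else 0) = 0 := by
          cases a <;> cases b <;> simp_all
        simp only [cntVC, h0, Nat.zero_add]

-- B's any over zipped flags = positivity of the transition count
lemma anyVC_eq (fl : List Bool) : anyVC fl = decide (0 < cntVC fl) := by
  induction fl with
  | nil => simp [anyVC, cntVC, PySem.List.slice_from_one]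
  | cons a t ih =>
    cases t with
    | nil => simp [anyVC, cntVC, PySem.List.slice_from_one]
    | cons b t' =>
      simp only [anyVC, PySem.List.slice_from_one, List.tail_cons] at ih ⊢
      simp only [List.zip_cons_cons, List.any_cons, cntVC]
      rw [ih]
      by_cases hb : (b && !a) = true
      · simp [hb]
      · simp only [Bool.not_eq_true] at hb
        simp [hb]

-- word[i] of w ++ [c] for i inside w
lemma pyGetD_append_left (w : List Char) (c : Char) (i : Nat) (h : i < w.length) :
    PySem.List.pyGetD (w ++ [c]) ((i : Nat) : Int) ' ' = PySem.List.pyGetD w ((i : Nat) : Int) ' ' := by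
  rw [PySem.List.pyGetD_natCast, PySem.List.pyGetD_natCast, List.getD_append _ _ _ _ h]

-- isConsA only looks at indices ≤ i, so it is stable under appending a character
lemma isConsA_append (w : List Char) (c : Char) :
    ∀ i, i < w.length → isConsA (w ++ [c]) i = isConsA w i := by
  intro i
  induction i with
  | zero =>
    intro h
    simp only [isConsA, pyGetD_append_left w c 0 h]
  | succ i ih =>
    intro h
    simp only [isConsA, pyGetD_append_left w c (i + 1) h, ih (by omega)]

-- the forward fold computes exactly A's classification, plus the last class
lemma flags_inv (w : List Char) :
    w.foldl stepB ([], false) =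
      ((List.range w.length).map (fun i => isConsA w i),
       if w.length = 0 then false else isConsA w (w.length - 1)) := by
  induction w using List.reverseRecOn with
  | nil => rfl
  | append_singleton w c ih =>
    rw [List.foldl_append, ih]
    have hget : PySem.List.pyGetD (w ++ [c]) ((w.length : Nat) : Int) ' ' = c := by
      rw [PySem.List.pyGetD_natCast]
      simp [List.getD]
    have hcons : (!decide (c ∈ ['a','e','i','o','u']) &&
        !(decide (c = 'y') && (if w.length = 0 then false else isConsA w (w.length - 1))))
        = isConsA (w ++ [c]) w.length := by
      cases hn : w.length with
      | zero =>
        simp only [hn] at hget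
        simp only [isConsA, hget]
        by_cases hv : c ∈ ['a','e','i','o','u']
        · simp [hv]
        · by_cases hy : c = 'y' <;> simp [hv, hy]
      | succ i =>
        simp only [hn] at hget
        simp only [isConsA, hget]
        have hstab : isConsA (w ++ [c]) i = isConsA w i :=
          isConsA_append w c i (by omega)
        by_cases hv : c ∈ ['a','e','i','o','u']
        · simp [hv]
        · by_cases hy : c = 'y'
          · subst hy; simp [hv, hstab]
          · simp [hv, hy]
    have hmap : (List.range (w ++ [c]).length).map (fun i => isConsA (w ++ [c]) i)
        = (List.range w.length).map (fun i => isConsA w i) ++ [isConsA (w ++ [c]) w.length] := by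
      rw [List.length_append, List.length_singleton, List.range_succ, List.map_append]
      congr 1
      apply List.map_congr_left
      intro i hi
      exact isConsA_append w c i (List.mem_range.mp hi)
    simp only [List.foldl_cons, List.foldl_nil, stepB]
    rw [hcons, hmap]
    simp

-- B's flag list is A's classification of every index
lemma flagsB_eq (w : List Char) :
    flagsB w = (List.range w.length).map (fun i => isConsA w i) := by
  simp [flagsB, flags_inv]

-- the measure test: A's count positivity = B's any
lemma measure_iff (stem : List Char) :
    (0 < measureA stem) ↔ anyVC (flagsB stem) = true := by
  have hcvs : (List.range stem.length).foldl
      (fun acc i => acc ++ [if isConsA stem i then 'c' else 'v']) ([] : List Char)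
      = ((List.range stem.length).map (fun i => isConsA stem i)).map conv := by
    rw [PySem.List.foldl_append_singleton_eq_map]
    simp [List.map_map, conv, Function.comp]
  have hcount : measureA stem = cntVC ((List.range stem.length).map (fun i => isConsA stem i)) := by
    unfold measureA
    rw [hcvs]
    have : PySem.Chars.count (((List.range stem.length).map (fun i => isConsA stem i)).map conv) ['v','c']
        = PySem.Chars.count.go ['v','c'] (((List.range stem.length).map (fun i => isConsA stem i)).map conv).length
            (((List.range stem.length).map (fun i => isConsA stem i)).map conv) 0 := by
      simp [PySem.Chars.count]
    rw [this, go_count_eq _ _ 0 (le_refl _)]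
    omega
  rw [hcount, flagsB_eq, anyVC_eq]
  simp

-- ends(word, suffix) agrees with word.endswith(suffix) for nonempty suffixes
lemma ends_iff (w suf : List Char) (h : suf ≠ []) :
    endsA w suf = PySem.Chars.endswith w suf := by
  have hk : 0 < suf.length := List.length_pos_iff.mpr h
  unfold endsA PySem.Chars.endswith
  rw [PySem.List.slice_from_neg_natCast w suf.length hk]
  have : (List.drop (w.length - suf.length) w == suf) = decide (suf <:+ w) := by
    by_cases hs : suf <:+ w
    · have := List.suffix_iff_eq_drop.mp hs
      simp [hs, ← this]
    · simp only [hs, decide_false, beq_eq_false_iff_ne, ne_eq]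
      intro heq
      exact hs (heq ▸ List.drop_suffix _ _)
  rw [this]
  by_cases hs : suf <:+ w
  · simp [hs, List.isSuffixOf_iff_suffix.mpr hs]
  · simp only [hs, decide_false]
    cases hb : suf.isSuffixOf w
    · rfl
    · exact absurd (List.isSuffixOf_iff_suffix.mp hb) hs

-- the two suffix loops agree pair by pair
lemma go_eq (w : List Char) : ∀ (L : List (List Char × List Char)),
    (∀ p ∈ L, p.1 ≠ []) → stepA_go w L = stepB_go w L := by
  intro L hL
  induction L with
  | nil => rfl
  | cons p rest ih =>
    obtain ⟨suf, rep⟩ := p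
    have hsuf : suf ≠ [] := hL (suf, rep) (by simp)
    have hrest : ∀ p ∈ rest, p.1 ≠ [] := fun p hp => hL p (List.mem_cons_of_mem _ hp)
    simp only [stepA_go, stepB_go]
    rw [← ends_iff w suf hsuf]
    by_cases he : endsA w suf = true
    · simp only [he, if_pos]
      by_cases hm : 0 < measureA (PySem.List.slice w none (some (-(suf.length : Int))))
      · rw [if_pos hm, if_pos ((measure_iff _).mp hm)]
        rfl
      · rw [if_neg hm, if_neg (fun hc => hm ((measure_iff _).mpr hc))]
        exact ih hrest
    · simp only [Bool.not_eq_true] at he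
      rw [he]
      rw [if_neg Bool.false_ne_true, if_neg Bool.false_ne_true]
      exact ih hrest

-- ===== VERDICT (by name: the statement is the Claim_ definition above) =====
theorem step_3_spec : Claim_equal_step_3 := by
  intro word _
  unfold Spec_step_3 step_3 step_3_alt
  rw [go_eq word.toList _ (by decide)]
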